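-- pv_equiv track=rewrite | github.com/0xRamadan/Algorithms-and-Data-Structures-training---IEEE-CS-ZSB | CS21-Science-Day-9/A. Tom Riddle's Diary.py | isPossessed
-- ===== SOURCE A (Python) =====
-- def isPossessed(lengthOfList, namesInDiary):
--     # main logic
--     result = []
--     # this is because any first name in namesInDiary won't be possessed
--     result.append("NO")
--     for i in range(1, lengthOfList):
--         if namesInDiary[i] in namesInDiary[:i]:
--             result.append("YES")
--         else:
--             result.append("NO")
--     return result
-- ===== SOURCE B (Python) =====
-- def isPossessed(lengthOfList, namesInDiary):
--     # inverted marking: presume every later position is a repeat ("YES"),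
--     # then clear exactly the first-occurrence positions back to "NO"
--     firsts = {}
--     for i in range(lengthOfList):
--         firsts.setdefault(namesInDiary[i], i)
--     result = ["NO"] + ["YES"] * (lengthOfList - 1)
--     for i in firsts.values():
--         result[i] = "NO"
--     return result
-- ===== Notes on version B (the rewrite author's own statement) =====
-- stated objective: faster
-- what changed: B inverts the marking: instead of A's per-index membership scan of a growing prefix slice, B collects each name's first-occurrence position in one pass, preallocates an all-YES answer array and clears exactly those first-occurrence positions back to NO by scatter writes.
-- outside the precondition, e.g. on isPossessed(1, []): A returns ['NO'], B raises IndexError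
import Mathlib
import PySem

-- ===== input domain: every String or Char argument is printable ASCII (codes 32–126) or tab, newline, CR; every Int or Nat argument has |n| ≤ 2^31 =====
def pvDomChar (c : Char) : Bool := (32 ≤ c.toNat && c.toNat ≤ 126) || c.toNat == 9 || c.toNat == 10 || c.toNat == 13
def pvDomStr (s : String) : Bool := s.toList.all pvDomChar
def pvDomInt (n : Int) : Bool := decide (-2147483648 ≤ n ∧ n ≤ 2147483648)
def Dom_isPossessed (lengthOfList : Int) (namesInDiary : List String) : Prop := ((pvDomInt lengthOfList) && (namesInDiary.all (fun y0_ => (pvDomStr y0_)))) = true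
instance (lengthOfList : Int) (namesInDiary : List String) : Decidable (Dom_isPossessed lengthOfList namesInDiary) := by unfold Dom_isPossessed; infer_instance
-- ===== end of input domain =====

-- B inverts the marking instead of scanning a growing prefix per index: one pass collects each
-- name's first-occurrence position, then an all-"YES" answer array is preallocated and exactly
-- those first-occurrence positions are cleared back to "NO" (objective: faster, O(n) vs O(n^2)).

-- ===== PORT A =====
def isPossessed (lengthOfList : Int) (namesInDiary : List String) : List String :=
  (PySem.List.pyRange 1 lengthOfList 1).foldl
    (fun result i =>
      if (PySem.List.slice namesInDiary none (some i)).contains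
           (PySem.List.pyGetD namesInDiary i "") then
        result ++ ["YES"]
      else
        result ++ ["NO"])
    ["NO"]

-- ===== PORT B =====
-- B's first pass: firsts.setdefault(namesInDiary[i], i) over range(lengthOfList)
def isPossessedFirsts (namesInDiary : List String) (lengthOfList : Int) : PySem.Dict String Int :=
  (PySem.List.pyRange 0 lengthOfList 1).foldl
    (fun d i => d.setdefault (PySem.List.pyGetD namesInDiary i "") i)
    PySem.Dict.empty

def isPossessed_alt (lengthOfList : Int) (namesInDiary : List String) : List String :=
  (isPossessedFirsts namesInDiary lengthOfList).values.foldl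
    (fun r i => r.set i.toNat "NO")
    (["NO"] ++ List.replicate (lengthOfList - 1).toNat "YES")

-- ===== PRECONDITION & SPEC =====
-- Pre_ excludes lengthOfList > len(namesInDiary): there A's indexing raises IndexError,
-- except for the single shape lengthOfList = 1 with an empty list, where A returns ["NO"]
-- but B's first indexing pass itself raises IndexError.
def Pre_isPossessed (lengthOfList : Int) (namesInDiary : List String) : Prop :=
  lengthOfList ≤ namesInDiary.length ∨ lengthOfList ≤ 0
instance (lengthOfList : Int) (namesInDiary : List String) : Decidable (Pre_isPossessed lengthOfList namesInDiary) := by unfold Pre_isPossessed; infer_instance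

def pvWitness_isPossessed : Int × List String := (3, ["tom", "riddle", "tom"])

def Spec_isPossessed (lengthOfList : Int) (namesInDiary : List String) (out : List String) : Prop := out = isPossessed_alt lengthOfList namesInDiary
instance (lengthOfList : Int) (namesInDiary : List String) (out : List String) : Decidable (Spec_isPossessed lengthOfList namesInDiary out) := by unfold Spec_isPossessed; infer_instance

-- ===== CLAIM (what is proved, stated in full; the proofs are below) =====
def Claim_equal_isPossessed : Prop := ∀ (lengthOfList : Int) (namesInDiary : List String), Dom_isPossessed lengthOfList namesInDiary → Pre_isPossessed lengthOfList namesInDiary → Spec_isPossessed lengthOfList namesInDiary (isPossessed lengthOfList namesInDiary)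

-- ===== LEMMAS AND PROOFS =====

-- B's dict records, for each name, its first-occurrence index within the first n names
lemma firsts_get? (xs : List String) (n : Nat) (hn : n ≤ xs.length) :
    ∀ name, (isPossessedFirsts xs n).get? name
      = Option.map Int.ofNat (PySem.List.index? (xs.take n) name) := by
  induction n with
  | zero =>
    intro name
    simp [isPossessedFirsts, PySem.List.pyRange_one_eq_nil, PySem.Dict.get?_empty,
      PySem.List.index?]
  | succ m ih =>
    have hm : m < xs.length := by omega
    have ih' := ih (by omega)
    have hr : PySem.List.pyRange 0 ((m : Int) + 1) 1
        = PySem.List.pyRange 0 (m : Int) 1 ++ [(m : Int)] :=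
      PySem.List.pyRange_one_succ_right (by positivity)
    have hcast : ((m + 1 : Nat) : Int) = (m : Int) + 1 := by push_cast; ring
    have hget : PySem.List.pyGetD xs (m : Int) "" = xs[m] := PySem.List.pyGetD_ofNat xs m "" hm
    have htake : xs.take (m + 1) = xs.take m ++ [xs[m]] := by
      rw [List.take_add_one]; simp [hm]
    have hstep : isPossessedFirsts xs ((m + 1 : Nat) : Int)
        = (isPossessedFirsts xs m).setdefault xs[m] (m : Int) := by
      simp only [isPossessedFirsts, hcast, hr, List.foldl_append, List.foldl_cons,
        List.foldl_nil, hget]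
    intro name
    rw [hstep, htake]
    by_cases hmem : xs[m] ∈ xs.take m
    · have hc : (isPossessedFirsts xs m).contains xs[m] = true := by
        obtain ⟨k, hk⟩ := Option.isSome_iff_exists.mp
          ((PySem.List.index?_isSome_iff _ _).mpr hmem)
        rw [PySem.Dict.contains_eq_isSome_get?, ih' xs[m], hk]
        rfl
      rw [PySem.Dict.setdefault_of_contains _ _ hc]
      by_cases hname : name ∈ xs.take m
      · rw [PySem.List.index?_append_of_mem _ hname, ih']
      · have hne : name ≠ xs[m] := fun h => hname (h ▸ hmem)
        have h2 : PySem.List.index? (xs.take m ++ [xs[m]]) name = none := by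
          rw [PySem.List.index?_eq_none_iff]
          intro h
          rcases List.mem_append.mp h with h | h
          · exact hname h
          · exact hne (List.mem_singleton.mp h)
        rw [ih', (PySem.List.index?_eq_none_iff _ _).mpr hname, h2]
    · have hc : (isPossessedFirsts xs m).contains xs[m] = false := by
        rw [PySem.Dict.contains_eq_isSome_get?, ih' xs[m],
          (PySem.List.index?_eq_none_iff _ _).mpr hmem]
        rfl
      rw [PySem.Dict.setdefault_of_not_contains _ _ hc]
      by_cases hname : name = xs[m]
      · subst hname
        have hidx := PySem.List.index?_append_singleton_self (xs.take m) _ hmem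
        rw [PySem.Dict.get?_insert_self, hidx]
        simp [List.length_take, Nat.min_eq_left (le_of_lt hm)]
      · rw [PySem.Dict.get?_insert_of_ne _ _ hname, ih']
        by_cases h2 : name ∈ xs.take m
        · rw [PySem.List.index?_append_of_mem _ h2]
        · have hB : PySem.List.index? (xs.take m ++ [xs[m]]) name = none := by
            rw [PySem.List.index?_eq_none_iff]
            intro h
            rcases List.mem_append.mp h with h | h
            · exact h2 h
            · exact hname (List.mem_singleton.mp h)
          rw [(PySem.List.index?_eq_none_iff _ _).mpr h2, hB]

-- the first occurrence of xs[i] within take L xs is i iff xs[i] does not occur before i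
lemma index?_take_eq_iff (xs : List String) (i L : Nat) (hiL : i < L) (hL : L ≤ xs.length) :
    PySem.List.index? (xs.take L) (xs[i]'(by omega)) = some i
      ↔ (xs[i]'(by omega)) ∉ xs.take i := by
  have hi : i < xs.length := by omega
  constructor
  · intro h hmem
    obtain ⟨hk, _, hfirst⟩ := PySem.List.getElem_of_index?_eq_some h
    obtain ⟨j, hj, hval⟩ := List.mem_iff_getElem.mp hmem
    have hj' : j < i := by
      have := hj; simp [List.length_take] at this; omega
    have : (xs.take L)[j]'(by simp [List.length_take]; omega) = xs[i]'hi := by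
      rw [List.getElem_take]
      rw [List.getElem_take] at hval
      exact hval
    exact hfirst j hj' this
  · intro hmem
    rw [PySem.List.index?_eq_some_iff]
    refine ⟨xs.take i, (xs.take L).drop (i + 1), ?_, by simp [List.length_take]; omega, hmem⟩
    have h1 : (xs.take L).take i = xs.take i := by
      rw [List.take_take]; congr 1; omega
    have h2 : (xs.take L).drop i = (xs[i]'hi) :: (xs.take L).drop (i + 1) := by
      rw [List.drop_eq_getElem_cons (by simp [List.length_take]; omega)]
      congr 1
      exact List.getElem_take
    conv_lhs => rw [← List.take_append_drop i (xs.take L)]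
    rw [h1, h2]

-- keys stay distinct through the setdefault loop
lemma nodup_keys_firsts (xs : List String) (L : Int) :
    (isPossessedFirsts xs L).keys.Nodup := by
  unfold isPossessedFirsts
  have h : ∀ (l : List Int) (d : PySem.Dict String Int), d.keys.Nodup →
      (l.foldl (fun d i => d.setdefault (PySem.List.pyGetD xs i "") i) d).keys.Nodup := by
    intro l
    induction l with
    | nil => intro d hd; exact hd
    | cons i t ih =>
      intro d hd
      simp only [List.foldl_cons]
      apply ih
      by_cases hc : d.contains (PySem.List.pyGetD xs i "") = true
      · rw [PySem.Dict.setdefault_of_contains _ _ hc]; exact hd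
      · rw [PySem.Dict.setdefault_of_not_contains _ _ (by simpa using hc)]
        exact PySem.Dict.nodup_keys_insert _ _ _ hd
  exact h _ _ PySem.Dict.nodup_keys_empty

-- membership in the value list of a dict with distinct keys
lemma mem_values_iff_get? {κ ν : Type} [BEq κ] [LawfulBEq κ] (d : PySem.Dict κ ν)
    (hnd : d.keys.Nodup) (v : ν) : v ∈ d.values ↔ ∃ k, d.get? k = some v := by
  constructor
  · intro h
    simp only [PySem.Dict.values, List.mem_map] at h
    obtain ⟨⟨k, w⟩, hp, hw⟩ := h
    refine ⟨k, ?_⟩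
    rw [PySem.Dict.get?_of_mem_items d hp hnd]
    exact congrArg some hw
  · rintro ⟨k, hk⟩
    have hm := PySem.Dict.mem_items_of_get?_eq_some d hk
    simp only [PySem.Dict.values, List.mem_map]
    exact ⟨(k, v), hm, rfl⟩

-- a position j < n is a value of the firsts dict iff xs[j] is a first occurrence
lemma mem_values_firsts (xs : List String) (n : Nat) (hn : n ≤ xs.length)
    (j : Nat) (hj : j < n) :
    ((j : Int) ∈ (isPossessedFirsts xs n).values) ↔ (xs[j]'(by omega)) ∉ xs.take j := by
  rw [mem_values_iff_get? _ (nodup_keys_firsts xs n)]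
  constructor
  · rintro ⟨name, hname⟩
    rw [firsts_get? xs n hn] at hname
    rcases hx : PySem.List.index? (xs.take n) name with _ | k
    · rw [hx] at hname; simp at hname
    · rw [hx] at hname
      simp only [Option.map_some, Option.some.injEq, Int.ofNat_eq_natCast] at hname
      have hk : j = k := by omega
      subst hk
      obtain ⟨hklen, hval, _⟩ := PySem.List.getElem_of_index?_eq_some hx
      have hnv : name = xs[j]'(by omega) := by
        rw [← hval]; exact List.getElem_take
      subst hnv
      exact (index?_take_eq_iff xs j n hj hn).mp hx
  · intro hmem
    refine ⟨xs[j]'(by omega), ?_⟩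
    rw [firsts_get? xs n hn, (index?_take_eq_iff xs j n hj hn).mpr hmem]
    rfl
-- every value of the firsts dict is nonnegative
lemma values_firsts_nonneg (xs : List String) (n : Nat) (hn : n ≤ xs.length) :
    ∀ v ∈ (isPossessedFirsts xs n).values, 0 ≤ v := by
  intro v hv
  rw [mem_values_iff_get? _ (nodup_keys_firsts xs n)] at hv
  obtain ⟨k, hk⟩ := hv
  rw [firsts_get? xs n hn] at hk
  rcases hx : PySem.List.index? (xs.take n) k with _ | m
  · rw [hx] at hk; simp at hk
  · rw [hx] at hk
    simp only [Option.map_some, Option.some.injEq, Int.ofNat_eq_natCast] at hk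
    omega

-- the scatter loop keeps the length
lemma scatter_length (is : List Int) (r : List String) :
    (is.foldl (fun r i => r.set i.toNat "NO") r).length = r.length := by
  induction is generalizing r with
  | nil => rfl
  | cons i t ih => simp [List.foldl_cons, ih]

-- element j of the scatter result: "NO" where some write hit j, the original element otherwise
lemma scatter_getElem? (is : List Int) (r : List String) (j : Nat)
    (hnn : ∀ i ∈ is, 0 ≤ i) (hj : j < r.length) :
    (is.foldl (fun r i => r.set i.toNat "NO") r)[j]?
      = if ((j : Int) ∈ is) then some "NO" else r[j]? := by
  induction is generalizing r with
  | nil => rw [List.foldl_nil, if_neg (List.not_mem_nil)]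
  | cons i t ih =>
    simp only [List.foldl_cons]
    have hnn' : ∀ x ∈ t, (0:Int) ≤ x := fun x hx => hnn x (List.mem_cons_of_mem _ hx)
    rw [ih _ hnn' (by simpa using hj)]
    by_cases hmem : (j : Int) ∈ t
    · rw [if_pos hmem, if_pos (List.mem_cons_of_mem _ hmem)]
    · rw [if_neg hmem]
      by_cases hij : i = (j : Int)
      · have hset : i.toNat = j := by omega
        rw [if_pos (by rw [hij]; exact List.mem_cons_self), hset,
          List.getElem?_set_self', List.getElem?_eq_getElem hj]
        rfl
      · have hne : i.toNat ≠ j := by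
          have := hnn i (List.mem_cons_self)
          omega
        have hnm : (j : Int) ∉ (i :: t) := by
          intro h
          rcases List.mem_cons.mp h with h | h
          · exact hij h.symm
          · exact hmem h
        rw [if_neg hnm, List.getElem?_set_ne hne]

-- A rewritten as a map over the range
lemma isPossessed_eq_map (L : Int) (xs : List String) :
    isPossessed L xs = ["NO"] ++ (PySem.List.pyRange 1 L 1).map
      (fun i => if (PySem.List.slice xs none (some i)).contains
          (PySem.List.pyGetD xs i "") then "YES" else "NO") := by
  unfold isPossessed
  rw [← PySem.List.foldl_append_singleton_eq_map]
  congr 1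
  funext r i
  split <;> rfl

lemma isPossessed_eq (L : Int) (xs : List String) (hpre : Pre_isPossessed L xs) :
    isPossessed L xs = isPossessed_alt L xs := by
  by_cases hL : L ≤ 0
  · rw [isPossessed_eq_map, PySem.List.pyRange_one_eq_nil (by omega)]
    unfold isPossessed_alt isPossessedFirsts
    rw [PySem.List.pyRange_one_eq_nil (by omega)]
    have h0 : (L - 1).toNat = 0 := by omega
    simp [h0, PySem.Dict.empty, PySem.Dict.values]
  · have hLlen : L ≤ (xs.length : Int) := by
      rcases hpre with h | h
      · exact h
      · omega
    set n := L.toNat with hn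
    have hLn : L = (n : Int) := by omega
    have hn1 : 1 ≤ n := by omega
    have hnlen : n ≤ xs.length := by omega
    have hlen1 : (L - 1).toNat = n - 1 := by omega
    have hlenA : (isPossessed L xs).length = n := by
      rw [isPossessed_eq_map]
      simp [PySem.List.length_pyRange_one]
      omega
    have hr0len : ((["NO"] : List String) ++ List.replicate (L - 1).toNat "YES").length = n := by
      simp [hlen1]; omega
    apply List.ext_getElem?
    intro k
    by_cases hkn : k < n
    · have hkx : k < xs.length := by omega
      -- A side: element k is "YES" iff k ≥ 1 and xs[k] already occurred
      have hA : (isPossessed L xs)[k]?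
          = some (if k ≠ 0 ∧ (xs[k]'hkx) ∈ xs.take k then "YES" else "NO") := by
        rw [isPossessed_eq_map]
        rcases k with _ | m
        · simp
        · rw [List.getElem?_append_right (by simp)]
          simp only [List.length_cons, List.length_nil, Nat.add_sub_cancel]
          rw [List.getElem?_map, PySem.List.getElem?_pyRange_one,
            if_pos (show m < (L - 1).toNat by omega)]
          simp only [Option.map_some]
          have h1m : ((1:Int) + m) = ((m + 1 : Nat) : Int) := by push_cast; ring
          rw [h1m, PySem.List.slice_to xs (by positivity),
            PySem.List.pyGetD_ofNat xs (m + 1) "" (by omega)]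
          simp only [Int.toNat_natCast]
          by_cases hmem : (xs[m + 1]'(by omega)) ∈ xs.take (m + 1)
          · rw [if_pos (by simpa using hmem), if_pos ⟨Nat.succ_ne_zero m, hmem⟩]
          · rw [if_neg (by simpa using hmem), if_neg (by simp [hmem])]
      -- B side: element k is "NO" iff k is a first-occurrence position
      have hmemv : ((k : Int) ∈ (isPossessedFirsts xs L).values)
          ↔ (xs[k]'hkx) ∉ xs.take k := by
        rw [hLn]; exact mem_values_firsts xs n hnlen k hkn
      have hB : (isPossessed_alt L xs)[k]?
          = some (if (xs[k]'hkx) ∉ xs.take k then "NO" else "YES") := by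
        unfold isPossessed_alt
        rw [scatter_getElem? _ _ k
          (by rw [hLn]; exact values_firsts_nonneg xs n hnlen)
          (by rw [hr0len]; omega)]
        by_cases hmem : (xs[k]'hkx) ∈ xs.take k
        · have hk0 : k ≠ 0 := by
            intro h; subst h; simp at hmem
          rw [if_neg (fun h => (hmemv.mp h) hmem), if_neg (not_not_intro hmem)]
          rw [List.getElem?_append_right (by simp; omega)]
          rw [List.getElem?_replicate, if_pos (by simp [hlen1]; omega)]
        · rw [if_pos (hmemv.mpr hmem), if_pos hmem]
      rw [hA, hB]
      by_cases hmem : (xs[k]'hkx) ∈ xs.take k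
      · have hk0 : k ≠ 0 := by intro h; subst h; simp at hmem
        rw [if_pos ⟨hk0, hmem⟩, if_neg (not_not_intro hmem)]
      · rw [if_neg (by simp [hmem]), if_pos hmem]
    · rw [List.getElem?_eq_none (by omega)]
      rw [List.getElem?_eq_none]
      unfold isPossessed_alt
      rw [scatter_length, hr0len]
      omega

-- ===== VERDICT (by name: the statement is the Claim_ definition above) =====
theorem isPossessed_spec : Claim_equal_isPossessed := by
  intro L xs _ hpre
  exact isPossessed_eq L xs hpre
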